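-- pv_equiv track=rewrite | github.com/jovalie/mm_sds4rx | sds4rx/scripts/frequencies_gen.py | _combo_n
-- ===== SOURCE A (Python) =====
-- def _combo_n(choices, n):
--     if choices == [] or n == 0:
--         return []
--
--     if n == 1:
--         return [[c] for c in choices]
--
--     combos = []
--     for i in range(len(choices)):
--         c = choices[i]
--         remaining = choices[:i] + choices[i+1:]
--         tail = _combo_n(remaining, n-1)
--         combos += [t + [c] for t in tail]
--
--     return combos
-- ===== SOURCE B (Python) =====
-- def _combo_n(choices, n):
--     # Iterative breadth-first expansion of (suffix, remaining) states
--     # instead of A's per-index recursion; same output order.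
--     if not choices or n <= 0 or n > len(choices):
--         return []
--     states = [([], list(choices))]
--     for _ in range(n - 1):
--         states = [([rem[i]] + suffix, rem[:i] + rem[i + 1:])
--                   for suffix, rem in states
--                   for i in range(len(rem))]
--     return [[c] + suffix for suffix, rem in states for c in rem]
-- ===== Notes on version B (the rewrite author's own statement) =====
-- stated objective: alternative
-- what changed: Replaces A's per-index recursion with an iterative breadth-first expansion of (suffix, remaining) states, plus an up-front guard returning [] for n <= 0 or n > len(choices) instead of recursing down to the empty list.
import Mathlib
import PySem

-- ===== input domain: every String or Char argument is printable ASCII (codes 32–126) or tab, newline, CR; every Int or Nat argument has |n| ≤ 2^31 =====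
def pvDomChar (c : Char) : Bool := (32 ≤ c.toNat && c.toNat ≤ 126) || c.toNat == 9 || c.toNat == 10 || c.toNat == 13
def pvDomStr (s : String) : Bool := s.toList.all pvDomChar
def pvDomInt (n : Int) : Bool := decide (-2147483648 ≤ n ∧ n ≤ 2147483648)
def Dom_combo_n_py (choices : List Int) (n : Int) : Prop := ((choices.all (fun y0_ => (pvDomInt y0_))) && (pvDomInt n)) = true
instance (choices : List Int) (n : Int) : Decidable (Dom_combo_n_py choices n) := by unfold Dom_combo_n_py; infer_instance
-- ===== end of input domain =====

-- B replaces A's per-index recursion by an iterative breadth-first expansion of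
-- (suffix, remaining) states; same return value (alternative decomposition).

-- ===== PORT A =====
-- Literal port of A.  'combos += [...]' is the foldl over the loop indices;
-- choices[i] with i ∈ range(len choices) is in range, so getD matches Python exactly;
-- choices[:i] + choices[i+1:] is take/drop (nonnegative in-range slice).
def combo_n_py (choices : List Int) (n : Int) : List (List Int) :=
  if choices = [] ∨ n = 0 then []
  else if n = 1 then choices.map (fun c => [c])
  else
    (List.range choices.length).attach.foldl
      (fun combos i =>
        let c := choices.getD i.1 0
        let remaining := choices.take i.1 ++ choices.drop (i.1 + 1)
        combos ++ (combo_n_py remaining (n - 1)).map (fun t => t ++ [c]))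
      []
termination_by choices.length
decreasing_by
  have hi := i.2
  simp only [List.mem_range] at hi
  simp only [List.length_append, List.length_take, List.length_drop]
  omega

-- ===== PORT B =====
def combo_n_py_alt (choices : List Int) (n : Int) : List (List Int) :=
  if choices = [] ∨ n ≤ 0 ∨ (choices.length : Int) < n then []
  else
    let states := (List.range (n.toNat - 1)).foldl
      (fun states _ => states.flatMap (fun p =>
        (List.range p.2.length).map
          (fun i => (p.2.getD i 0 :: p.1, p.2.take i ++ p.2.drop (i + 1)))))
      [(([] : List Int), choices)]
    states.flatMap (fun p => p.2.map (fun c => c :: p.1))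

-- ===== PRECONDITION & SPEC =====
def Spec_combo_n_py (choices : List Int) (n : Int) (out : List (List Int)) : Prop := out = combo_n_py_alt choices n
instance (choices : List Int) (n : Int) (out : List (List Int)) : Decidable (Spec_combo_n_py choices n out) := by unfold Spec_combo_n_py; infer_instance

-- ===== CLAIM (what is proved, stated in full; the proofs are below) =====
def Claim_equal_combo_n_py : Prop := ∀ (choices : List Int) (n : Int), Dom_combo_n_py choices n → Spec_combo_n_py choices n (combo_n_py choices n)

-- ===== LEMMAS AND PROOFS =====

-- B's one-step state expansion
def pvStep (states : List (List Int × List Int)) : List (List Int × List Int) :=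
  states.flatMap (fun p =>
    (List.range p.2.length).map
      (fun i => (p.2.getD i 0 :: p.1, p.2.take i ++ p.2.drop (i + 1))))

-- semantics of a state: A's value on its remaining part, each appended with the suffix
def pvGA (m : Int) (p : List Int × List Int) : List (List Int) :=
  (combo_n_py p.2 m).map (fun t => t ++ p.1)

theorem foldl_append_attach {α β : Type} (l : List α) (g : α → List β) :
    l.attach.foldl (fun r x => r ++ g x.1) [] = l.flatMap g := by
  rw [PySem.List.foldl_append_eq_flatMap, List.nil_append]
  conv_rhs => rw [← List.attach_map_subtype_val l]
  rw [List.flatMap_map]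

theorem combo_n_py_unfold (choices : List Int) (n : Int)
    (hne : choices ≠ []) (h0 : n ≠ 0) (h1 : n ≠ 1) :
    combo_n_py choices n =
      (List.range choices.length).flatMap
        (fun i => (combo_n_py (choices.take i ++ choices.drop (i + 1)) (n - 1)).map
          (fun t => t ++ [choices.getD i 0])) := by
  rw [combo_n_py, if_neg (by simp [hne, h0]), if_neg h1]
  exact foldl_append_attach (List.range choices.length)
    (fun i => (combo_n_py (choices.take i ++ choices.drop (i + 1)) (n - 1)).map
      (fun t => t ++ [choices.getD i 0]))

theorem combo_n_py_nonpos (choices : List Int) (n : Int) (h : n ≤ 0) :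
    combo_n_py choices n = [] := by
  induction hlen : choices.length using Nat.strong_induction_on generalizing choices n with
  | _ L ih =>
    rcases eq_or_ne choices [] with hc | hc
    · simp [combo_n_py, hc]
    rcases eq_or_ne n 0 with h0 | h0
    · simp [combo_n_py, h0]
    have h1 : n ≠ 1 := by omega
    rw [combo_n_py_unfold choices n hc h0 h1]
    apply List.flatMap_eq_nil_iff.mpr
    intro i hi
    simp only [List.mem_range] at hi
    rw [ih ((choices.take i ++ choices.drop (i + 1)).length)
      (by subst hlen; simp only [List.length_append, List.length_take, List.length_drop]; omega)
      _ (n - 1) (by omega) rfl]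
    simp

theorem combo_n_py_too_big (choices : List Int) (n : Int)
    (h : (choices.length : Int) < n) : combo_n_py choices n = [] := by
  induction hlen : choices.length using Nat.strong_induction_on generalizing choices n with
  | _ L ih =>
    rcases eq_or_ne choices [] with hc | hc
    · simp [combo_n_py, hc]
    have hlen0 : 0 < choices.length := List.length_pos_iff.mpr hc
    have h0 : n ≠ 0 := by omega
    have h1 : n ≠ 1 := by
      intro h1; rw [h1] at h; omega
    rw [combo_n_py_unfold choices n hc h0 h1]
    apply List.flatMap_eq_nil_iff.mpr
    intro i hi
    simp only [List.mem_range] at hi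
    have hl : (choices.take i ++ choices.drop (i + 1)).length = choices.length - 1 := by
      simp only [List.length_append, List.length_take, List.length_drop]; omega
    rw [ih ((choices.take i ++ choices.drop (i + 1)).length)
      (by subst hlen; omega) _ (n - 1) (by rw [hl]; omega) rfl]
    simp

-- one expansion step applied to a single state
theorem pvGA_step (m : Int) (suffix rem : List Int) (h0 : m ≠ 0) (h1 : m ≠ 1) :
    pvGA m (suffix, rem) =
      (List.range rem.length).flatMap
        (fun i => pvGA (m - 1) (rem.getD i 0 :: suffix, rem.take i ++ rem.drop (i + 1))) := by
  rcases eq_or_ne rem [] with hc | hc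
  · simp [pvGA, hc, combo_n_py]
  unfold pvGA
  rw [combo_n_py_unfold rem m hc h0 h1, List.map_flatMap]
  apply List.flatMap_congr
  intro i hi
  simp [List.map_map, Function.comp_def]

theorem pvGA_one (p : List Int × List Int) :
    pvGA 1 p = p.2.map (fun c => c :: p.1) := by
  rcases eq_or_ne p.2 [] with hc | hc
  · simp [pvGA, hc, combo_n_py]
  · simp [pvGA, combo_n_py, hc, List.map_map, Function.comp_def]

theorem pvStep_flatMap (states : List (List Int × List Int)) (m : Int)
    (h0 : m ≠ 0) (h1 : m ≠ 1) :
    (pvStep states).flatMap (pvGA (m - 1)) = states.flatMap (pvGA m) := by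
  unfold pvStep
  rw [List.flatMap_assoc]
  apply List.flatMap_congr
  intro p hp
  rw [List.flatMap_map]
  rw [pvGA_step m p.1 p.2 h0 h1]

theorem pvIter_flatMap (j : Nat) (states : List (List Int × List Int)) :
    states.flatMap (pvGA ((j : Int) + 1)) = (pvStep^[j] states).flatMap (pvGA 1) := by
  induction j generalizing states with
  | zero => simp
  | succ k ih =>
    have h := pvStep_flatMap states ((k : Int) + 2) (by omega) (by omega)
    have h2 : ((k : Int) + 2) - 1 = (k : Int) + 1 := by ring
    rw [h2] at h
    rw [show ((k + 1 : Nat) : Int) + 1 = (k : Int) + 2 by push_cast; ring, ← h, ih,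
      Function.iterate_succ_apply]

theorem pvFoldl_range_step (k : Nat) (init : List (List Int × List Int)) :
    (List.range k).foldl (fun s _ => pvStep s) init = pvStep^[k] init := by
  induction k generalizing init with
  | zero => simp
  | succ m ih =>
    rw [List.range_succ_eq_map, List.foldl_cons, List.foldl_map, Function.iterate_succ_apply]
    exact ih (pvStep init)

theorem pvIter_flatMap' (m : Int) (j : Nat) (h : m = (j : Int) + 1)
    (states : List (List Int × List Int)) :
    states.flatMap (pvGA m) = (pvStep^[j] states).flatMap (pvGA 1) := by
  rw [h]; exact pvIter_flatMap j states

-- ===== VERDICT (by name: the statement is the Claim_ definition above) =====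
theorem combo_n_py_spec : Claim_equal_combo_n_py := by
  intro choices n _
  unfold Spec_combo_n_py combo_n_py_alt
  by_cases hz : choices = [] ∨ n ≤ 0 ∨ (choices.length : Int) < n
  · rw [if_pos hz]
    rcases hz with hc | hn | hb
    · simp [combo_n_py, hc]
    · exact combo_n_py_nonpos choices n hn
    · exact combo_n_py_too_big choices n hb
  · rw [if_neg hz]
    push Not at hz
    obtain ⟨hc, hn, hb⟩ := hz
    show combo_n_py choices n =
      ((List.range (n.toNat - 1)).foldl
        (fun states _ => states.flatMap (fun p =>
          (List.range p.2.length).map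
            (fun i => (p.2.getD i 0 :: p.1, p.2.take i ++ p.2.drop (i + 1)))))
        [(([] : List Int), choices)]).flatMap (fun p => p.2.map (fun c => c :: p.1))
    rw [show ((List.range (n.toNat - 1)).foldl
        (fun states _ => states.flatMap (fun p =>
          (List.range p.2.length).map
            (fun i => (p.2.getD i 0 :: p.1, p.2.take i ++ p.2.drop (i + 1)))))
        [(([] : List Int), choices)]) = pvStep^[n.toNat - 1] [(([] : List Int), choices)]
      from pvFoldl_range_step (n.toNat - 1) [(([] : List Int), choices)]]
    have hstart : combo_n_py choices n = [(([] : List Int), choices)].flatMap (pvGA n) := by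
      simp [pvGA]
    rw [hstart, pvIter_flatMap' n (n.toNat - 1) (by omega) [(([] : List Int), choices)]]
    apply List.flatMap_congr
    intro p hp
    exact pvGA_one p
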